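-- pv_equiv track=rewrite | github.com/karthikk/grantha | build.py | breadcrumb_html
-- ===== SOURCE A (Python) =====
-- def breadcrumb_html(crumbs):
--     """crumbs = [(url, label), ...] last one has no url."""
--     parts = []
--     for i, c in enumerate(crumbs):
--         if i == len(crumbs) - 1:
--             parts.append(c[1])
--         else:
--             parts.append(f'<a href="{c[0]}">{c[1]}</a>')
--     return '<nav class="breadcrumb">\n    ' + '<span class="sep">»</span>'.join(parts) + '\n  </nav>'
-- ===== SOURCE B (Python) =====
-- def breadcrumb_html(crumbs):
--     """crumbs = [(url, label), ...] last one has no url."""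
--     def render(cs):
--         if len(cs) == 1:
--             return cs[0][1]
--         url, label = cs[0]
--         return '<a href="%s">%s</a><span class="sep">\u00bb</span>' % (url, label) + render(cs[1:])
--     middle = render(crumbs) if crumbs else ''
--     return '<nav class="breadcrumb">\n    ' + middle + '\n  </nav>'
-- ===== Notes on version B (the rewrite author's own statement) =====
-- stated objective: alternative
-- what changed: Replaces A's parts-list accumulation with a per-index last-element check followed by a join by a direct structural recursion that builds the inner HTML string itself, fusing the separator into each non-final link; no intermediate list and no join.
import Mathlib
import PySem

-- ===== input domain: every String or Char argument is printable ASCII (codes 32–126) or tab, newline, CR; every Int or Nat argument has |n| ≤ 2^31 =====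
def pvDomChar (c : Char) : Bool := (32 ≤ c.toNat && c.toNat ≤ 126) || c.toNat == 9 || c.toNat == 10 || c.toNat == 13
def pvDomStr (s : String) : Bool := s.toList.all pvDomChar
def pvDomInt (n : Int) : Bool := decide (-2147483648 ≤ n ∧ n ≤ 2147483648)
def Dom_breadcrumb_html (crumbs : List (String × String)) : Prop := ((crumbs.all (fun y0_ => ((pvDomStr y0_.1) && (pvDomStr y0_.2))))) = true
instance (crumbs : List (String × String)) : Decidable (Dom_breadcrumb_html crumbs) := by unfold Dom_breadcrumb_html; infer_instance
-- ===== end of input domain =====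

-- B abandons A's parts-list-plus-join design: it builds the inner HTML directly by structural
-- recursion on the crumb list (separator fused into each non-final link), no list, no join.

-- ===== PORT A =====
def breadcrumb_html (crumbs : List (String × String)) : String :=
  let parts := (PySem.List.enumerate crumbs 0).foldl
    (fun parts ic =>
      if ic.1 = (crumbs.length : Int) - 1 then parts ++ [ic.2.2]
      else parts ++ ["<a href=\"" ++ ic.2.1 ++ "\">" ++ ic.2.2 ++ "</a>"]) []
  "<nav class=\"breadcrumb\">\n    " ++ PySem.Str.join "<span class=\"sep\">»</span>" parts ++ "\n  </nav>"

-- ===== PORT B =====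
-- Python's inner 'render' (only ever called on a non-empty list; the [] branch is unreachable)
def bcRender : List (String × String) → String
  | [] => ""
  | [c] => c.2
  | c :: rest =>
      "<a href=\"" ++ c.1 ++ "\">" ++ c.2 ++ "</a><span class=\"sep\">»</span>" ++ bcRender rest

def breadcrumb_html_alt (crumbs : List (String × String)) : String :=
  let middle := if crumbs.isEmpty then "" else bcRender crumbs
  "<nav class=\"breadcrumb\">\n    " ++ middle ++ "\n  </nav>"

-- ===== PRECONDITION & SPEC =====
def Spec_breadcrumb_html (crumbs : List (String × String)) (out : String) : Prop := out = breadcrumb_html_alt crumbs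
instance (crumbs : List (String × String)) (out : String) : Decidable (Spec_breadcrumb_html crumbs out) := by unfold Spec_breadcrumb_html; infer_instance

-- ===== CLAIM =====
def Claim_equal_breadcrumb_html : Prop := ∀ (crumbs : List (String × String)), Dom_breadcrumb_html crumbs → Spec_breadcrumb_html crumbs (breadcrumb_html crumbs)

-- ===== LEMMAS AND PROOFS =====

-- A's parts list equals "links over dropLast ++ last label"
theorem parts_eq (crumbs : List (String × String)) :
    (PySem.List.enumerate crumbs 0).foldl
      (fun parts ic =>
        if ic.1 = (crumbs.length : Int) - 1 then parts ++ [ic.2.2]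
        else parts ++ ["<a href=\"" ++ ic.2.1 ++ "\">" ++ ic.2.2 ++ "</a>"]) []
    = (crumbs.dropLast).map (fun c => "<a href=\"" ++ c.1 ++ "\">" ++ c.2 ++ "</a>")
      ++ (match crumbs.getLast? with
          | some c => [c.2]
          | none => []) := by
  have hbody : ∀ (acc : List String) (ic : Int × String × String),
      (if ic.1 = (crumbs.length : Int) - 1 then acc ++ [ic.2.2]
       else acc ++ ["<a href=\"" ++ ic.2.1 ++ "\">" ++ ic.2.2 ++ "</a>"])
      = acc ++ [if ic.1 = (crumbs.length : Int) - 1 then ic.2.2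
                else "<a href=\"" ++ ic.2.1 ++ "\">" ++ ic.2.2 ++ "</a>"] := by
    intro acc ic; split_ifs <;> rfl
  rw [funext fun acc => funext fun ic => hbody acc ic,
      PySem.List.foldl_append_singleton_eq_map, List.nil_append]
  induction crumbs using List.reverseRecOn with
  | nil => rfl
  | append_singleton xs x _ =>
    rw [PySem.List.enumerate_append, List.map_append, List.dropLast_concat,
        List.getLast?_concat]
    have h1 : List.map
        (fun ic => if ic.1 = ((xs ++ [x]).length : Int) - 1 then ic.2.2
                   else "<a href=\"" ++ ic.2.1 ++ "\">" ++ ic.2.2 ++ "</a>")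
        (PySem.List.enumerate xs 0)
        = List.map (fun c => "<a href=\"" ++ c.1 ++ "\">" ++ c.2 ++ "</a>") xs := by
      calc List.map
            (fun ic => if ic.1 = ((xs ++ [x]).length : Int) - 1 then ic.2.2
                       else "<a href=\"" ++ ic.2.1 ++ "\">" ++ ic.2.2 ++ "</a>")
            (PySem.List.enumerate xs 0)
          = List.map
              ((fun c => "<a href=\"" ++ c.1 ++ "\">" ++ c.2 ++ "</a>") ∘ (·.2))
              (PySem.List.enumerate xs 0) := by
            apply List.map_congr_left
            intro p hp
            rcases (PySem.List.mem_enumerate_iff _ _ _).1 hp with ⟨k, hk, rfl⟩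
            have hne : (0 : Int) + (k : Int) ≠ ((xs ++ [x]).length : Int) - 1 := by
              simp only [List.length_append, List.length_cons, List.length_nil]
              push_cast; omega
            simp
            intro h
            exact absurd h (by omega)
        _ = List.map (fun c => "<a href=\"" ++ c.1 ++ "\">" ++ c.2 ++ "</a>")
              ((PySem.List.enumerate xs 0).map (·.2)) := by rw [List.map_map]
        _ = _ := by rw [PySem.List.map_snd_enumerate]
    rw [h1]
    congr 1
    have ht : (0 + (xs.length : Int)) = ((xs ++ [x]).length : Int) - 1 := by
      simp only [List.length_append, List.length_cons, List.length_nil]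
      push_cast; omega
    simp [PySem.List.enumerate, ht]

theorem join_cons_ne (s a : String) (l : List String) (h : l ≠ []) :
    PySem.Str.join s (a :: l) = a ++ s ++ PySem.Str.join s l := by
  cases l with
  | nil => exact absurd rfl h
  | cons b t => simp [PySem.Str.join, PySem.Chars.join_cons_cons, String.append_assoc]

-- joining A's parts list is exactly B's recursive build
theorem join_parts (cs : List (String × String)) :
    PySem.Str.join "<span class=\"sep\">»</span>"
      ((cs.dropLast).map (fun c => "<a href=\"" ++ c.1 ++ "\">" ++ c.2 ++ "</a>")
        ++ (match cs.getLast? with | some c => [c.2] | none => []))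
    = (if cs.isEmpty then "" else bcRender cs) := by
  induction cs with
  | nil => decide
  | cons x rest ih =>
    cases rest with
    | nil => simp [PySem.Str.join, PySem.Chars.join_singleton, bcRender]
    | cons y t =>
      have hne : (((y :: t).dropLast).map (fun c => "<a href=\"" ++ c.1 ++ "\">" ++ c.2 ++ "</a>")
          ++ (match (y :: t).getLast? with | some c => [c.2] | none => [])) ≠ [] := by
        rw [List.getLast?_eq_some_getLast (l := y :: t) (by simp)]
        simp
      simp only [List.dropLast_cons₂, List.map_cons, List.getLast?_cons_cons, List.cons_append]
      rw [join_cons_ne _ _ _ hne, ih]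
      simp [bcRender, String.append_assoc]

-- ===== VERDICT =====
theorem breadcrumb_html_spec : Claim_equal_breadcrumb_html := by
  intro crumbs _
  show _ = _
  unfold breadcrumb_html breadcrumb_html_alt
  simp only [parts_eq, join_parts]
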